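-- pv_equiv track=rewrite | github.com/dtcc-platform/dtcc | sandbox/partition_sweden.py | build_adjacency_from_edges
-- ===== SOURCE A (Python) =====
-- def build_adjacency_from_edges(leaves, edge_map):
--     adj = {cid: set() for cid in range(len(leaves))}
--     for owners in edge_map.values():
--         if len(owners) >= 2:
--             for a in owners:
--                 for b in owners:
--                     if a != b:
--                         adj[a].add(b)
--     adj = {k: sorted(list(v)) for k, v in adj.items()}
--     return adj
-- ===== SOURCE B (Python) =====
-- def build_adjacency_from_edges(leaves, edge_map):
--     by_owner = {}
--     for owners in edge_map.values():
--         if len(owners) >= 2: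
--             for a in set(owners):
--                 by_owner.setdefault(a, []).append(owners)
--     result = {}
--     for cid in range(len(leaves)):
--         s = set()
--         for owners in by_owner.get(cid, []):
--             s.update(owners)
--         s.discard(cid)
--         result[cid] = sorted(s)
--     return result
-- ===== Notes on version B (the rewrite author's own statement) =====
-- stated objective: alternative
-- what changed: Instead of mutating a shared per-node adjacency dict edge-by-edge with an all-pairs a!=b double loop, B first builds an inverted index owner->list of qualifying owner groups, then computes each node's row independently as the union of its indexed groups with self discarded at the end (two staged passes, node-major output).
import Mathlib
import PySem

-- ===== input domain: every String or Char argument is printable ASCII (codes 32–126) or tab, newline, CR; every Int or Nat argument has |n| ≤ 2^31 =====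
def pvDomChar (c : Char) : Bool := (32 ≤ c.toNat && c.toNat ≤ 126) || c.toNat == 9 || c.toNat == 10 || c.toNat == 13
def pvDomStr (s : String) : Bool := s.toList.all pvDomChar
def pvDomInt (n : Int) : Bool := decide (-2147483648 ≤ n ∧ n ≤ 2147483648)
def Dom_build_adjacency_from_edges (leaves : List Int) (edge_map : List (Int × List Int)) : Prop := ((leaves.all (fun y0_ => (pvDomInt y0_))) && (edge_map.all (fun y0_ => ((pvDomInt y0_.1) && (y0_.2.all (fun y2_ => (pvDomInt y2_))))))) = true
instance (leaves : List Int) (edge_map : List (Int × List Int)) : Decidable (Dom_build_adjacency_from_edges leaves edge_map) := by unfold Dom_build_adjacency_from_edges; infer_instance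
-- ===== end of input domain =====

-- B builds an inverted index owner → qualifying owner groups, then computes each node's neighbour
-- row independently (union of its indexed groups, discard self) instead of A's edge-major mutation
-- of a shared adjacency dict with an all-pairs a ≠ b double loop (objective: alternative).

-- ===== PORT A =====
-- adj = {cid: set() for cid in range(len(leaves))}
def pvInitAdj (leaves : List Int) : PySem.Dict Int (PySem.Set Int) :=
  (PySem.List.pyRange 0 (leaves.length : Int) 1).foldl
    (fun d cid => d.insert cid PySem.Set.empty) PySem.Dict.empty

-- inner 'for b in owners: if a != b: adj[a].add(b)'
def pvAInner (owners : List Int) (a : Int) (d : PySem.Dict Int (PySem.Set Int)) :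
    PySem.Dict Int (PySem.Set Int) :=
  owners.foldl (fun d b => if a ≠ b then d.modify a PySem.Set.empty (fun s => PySem.Set.add s b) else d) d

-- one iteration of 'for owners in edge_map.values(): if len(owners) >= 2: for a in owners: …'
def pvAEdge (d : PySem.Dict Int (PySem.Set Int)) (p : Int × List Int) :
    PySem.Dict Int (PySem.Set Int) :=
  if 2 ≤ p.2.length then p.2.foldl (fun d a => pvAInner p.2 a d) d else d

def build_adjacency_from_edges (leaves : List Int) (edge_map : List (Int × List Int)) : List (Int × List Int) :=
  let adj := pvInitAdj leaves
  let adj := edge_map.foldl pvAEdge adj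
  adj.items.map (fun kv => (kv.1, PySem.List.sorted kv.2 (fun x => x) false))

-- ===== PORT B =====
-- for owners in edge_map.values(): if len(owners) >= 2: for a in set(owners):
--   by_owner.setdefault(a, []).append(owners)
def pvBIndex (edge_map : List (Int × List Int)) : PySem.Dict Int (List (List Int)) :=
  edge_map.foldl
    (fun d p => if 2 ≤ p.2.length then
        (PySem.Set.ofList p.2).foldl (fun d a => d.modify a [] (fun l => l ++ [p.2])) d
      else d)
    PySem.Dict.empty

-- s = set(); for owners in by_owner.get(cid, []): s.update(owners); s.discard(cid); sorted(s)
def pvBNbrs (by_owner : PySem.Dict Int (List (List Int))) (cid : Int) : List Int :=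
  let s := (by_owner.getD cid []).foldl (fun s owners => PySem.Set.update s owners) PySem.Set.empty
  PySem.List.sorted (PySem.Set.discard s cid) (fun x => x) false

-- result[cid] = … for cid in range(len(leaves))
def build_adjacency_from_edges_alt (leaves : List Int) (edge_map : List (Int × List Int)) : List (Int × List Int) :=
  let by_owner := pvBIndex edge_map
  (PySem.List.pyRange 0 (leaves.length : Int) 1).map (fun cid => (cid, pvBNbrs by_owner cid))

-- ===== PRECONDITION & SPEC =====
-- Pre_ excludes exactly the inputs where A raises KeyError: an owner with a distinct co-owner on
-- the same edge that is not a key of adj, i.e. not in range(len(leaves)).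
def Pre_build_adjacency_from_edges (leaves : List Int) (edge_map : List (Int × List Int)) : Prop :=
  ∀ p ∈ edge_map, ∀ a ∈ p.2, (∃ b ∈ p.2, b ≠ a) → 0 ≤ a ∧ a < (leaves.length : Int)
instance (leaves : List Int) (edge_map : List (Int × List Int)) : Decidable (Pre_build_adjacency_from_edges leaves edge_map) := by unfold Pre_build_adjacency_from_edges; infer_instance

def pvWitness_build_adjacency_from_edges : List Int × (List (Int × List Int)) :=
  ([10, 20, 30], [(1, [0, 2]), (2, [5, 5]), (3, [0, 1, 2])])

def Spec_build_adjacency_from_edges (leaves : List Int) (edge_map : List (Int × List Int)) (out : List (Int × List Int)) : Prop := out = build_adjacency_from_edges_alt leaves edge_map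
instance (leaves : List Int) (edge_map : List (Int × List Int)) (out : List (Int × List Int)) : Decidable (Spec_build_adjacency_from_edges leaves edge_map out) := by unfold Spec_build_adjacency_from_edges; infer_instance

-- ===== CLAIM =====
def Claim_equal_build_adjacency_from_edges : Prop := ∀ (leaves : List Int) (edge_map : List (Int × List Int)), Dom_build_adjacency_from_edges leaves edge_map → Pre_build_adjacency_from_edges leaves edge_map → Spec_build_adjacency_from_edges leaves edge_map (build_adjacency_from_edges leaves edge_map)
-- ===== LEMMAS AND PROOFS =====

-- generic: a fold whose every step keeps the key list equal to K keeps it equal to K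
theorem pv_keys_foldl_stable {β : Type} (K : List Int) (l : List β)
    (f : PySem.Dict Int (PySem.Set Int) → β → PySem.Dict Int (PySem.Set Int))
    (h : ∀ d x, x ∈ l → d.keys = K → (f d x).keys = K) :
    ∀ d : PySem.Dict Int (PySem.Set Int), d.keys = K → (l.foldl f d).keys = K := by
  induction l with
  | nil => intro d hd; simpa using hd
  | cons x t ih =>
    intro d hd
    exact ih (fun d y hy => h d y (List.mem_cons_of_mem _ hy)) _ (h d x (List.mem_cons_self) hd)

-- == the init dict: every value is the empty set, keys are range(len(leaves)) ==
theorem pv_getD_init_aux (l : List Int) :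
    ∀ (d : PySem.Dict Int (PySem.Set Int)), (∀ j, d.getD j PySem.Set.empty = PySem.Set.empty) →
    ∀ k, ((l.foldl (fun d c => d.insert c PySem.Set.empty) d).getD k PySem.Set.empty) = PySem.Set.empty := by
  induction l with
  | nil => intro d hd k; simpa using hd k
  | cons c t ih =>
    intro d hd k
    refine ih _ (fun j => ?_) k
    rw [PySem.Dict.getD_insert]
    split
    · rfl
    · exact hd j

theorem pv_getD_init (leaves : List Int) (k : Int) :
    (pvInitAdj leaves).getD k PySem.Set.empty = PySem.Set.empty :=
  pv_getD_init_aux _ _ (fun j => by simp [PySem.Dict.getD_empty]) k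

theorem pv_keys_init (leaves : List Int) :
    (pvInitAdj leaves).keys = PySem.List.pyRange 0 (leaves.length : Int) 1 := by
  unfold pvInitAdj
  rw [PySem.Dict.keys_foldl_insert (f := fun _ _ => PySem.Set.empty)]
  rw [PySem.Dict.keys_empty, PySem.Set.update_nil_left]
  exact PySem.Set.ofList_eq_self_of_nodup _ (PySem.List.nodup_pyRange_one 0 (leaves.length : Int))

-- == A's inner loop: value at a becomes update with the distinct co-owners; other keys untouched ==
theorem pv_getD_AInner (owners : List Int) (a : Int) :
    ∀ d k, (pvAInner owners a d).getD k PySem.Set.empty =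
      if k = a then PySem.Set.update (d.getD a PySem.Set.empty) (owners.filter (fun b => a ≠ b))
      else d.getD k PySem.Set.empty := by
  induction owners with
  | nil =>
    intro d k
    simp only [pvAInner, List.foldl_nil, List.filter_nil]
    split
    · next h => rw [h, PySem.Set.update_nil]
    · rfl
  | cons b t ih =>
    intro d k
    simp only [pvAInner, List.foldl_cons] at *
    by_cases hab : a ≠ b
    · rw [if_pos hab, ih]
      by_cases hk : k = a
      · subst hk
        rw [if_pos rfl, if_pos rfl, PySem.Dict.getD_modify_self, List.filter_cons,
            if_pos (by simpa using hab), PySem.Set.update_cons]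
      · rw [if_neg hk, if_neg hk, PySem.Dict.getD_modify, if_neg hk]
    · rw [if_neg hab, ih]
      by_cases hk : k = a
      · subst hk
        rw [if_pos rfl, if_pos rfl, List.filter_cons, if_neg (by simpa using hab)]
      · rw [if_neg hk, if_neg hk]

theorem pv_keys_AInner (owners : List Int) (a : Int) :
    ∀ d : PySem.Dict Int (PySem.Set Int),
      ((∃ b ∈ owners, b ≠ a) → a ∈ d.keys) → (pvAInner owners a d).keys = d.keys := by
  induction owners with
  | nil => intro d _; simp [pvAInner]
  | cons b t ih =>
    intro d hd
    simp only [pvAInner, List.foldl_cons] at *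
    by_cases hab : a ≠ b
    · rw [if_pos hab]
      have hmem : a ∈ d.keys := hd ⟨b, List.mem_cons_self, fun h => hab h.symm⟩
      have hc : d.contains a = true := (PySem.Dict.contains_iff_mem_keys d a).2 hmem
      have hkeys : (d.modify a PySem.Set.empty (fun s => PySem.Set.add s b)).keys = d.keys := by
        rw [PySem.Dict.keys_modify, PySem.Dict.keys_insert_of_contains d _ hc]
      rw [ih _ (fun _ => by rw [hkeys]; exact hmem), hkeys]
    · rw [if_neg hab]
      exact ih _ (fun ⟨c, hc, hca⟩ => hd ⟨c, List.mem_cons_of_mem _ hc, hca⟩)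

-- == A's outer per-edge loop (over a), membership characterisation ==
theorem pv_mem_AOuter (owners : List Int) (l : List Int) (hl : ∀ a ∈ l, a ∈ owners) :
    ∀ d k x, (x ∈ (l.foldl (fun d a => pvAInner owners a d) d).getD k PySem.Set.empty) ↔
      (x ∈ d.getD k PySem.Set.empty ∨ (k ∈ l ∧ x ∈ owners ∧ x ≠ k)) := by
  induction l with
  | nil => intro d k x; simp
  | cons a t ih =>
    intro d k x
    simp only [List.foldl_cons]
    rw [ih (fun y hy => hl y (List.mem_cons_of_mem _ hy))]
    rw [pv_getD_AInner]
    by_cases hk : k = a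
    · subst hk
      rw [if_pos rfl]
      simp only [PySem.Set.mem_update, List.mem_filter, decide_eq_true_eq, List.mem_cons]
      constructor
      · rintro (⟨h | ⟨h1, h2⟩⟩ | ⟨h1, h2, h3⟩)
        · exact Or.inl h
        · exact Or.inr ⟨by simp, h1, fun hxk => h2 hxk.symm⟩
        · exact Or.inr ⟨by simp, h2, h3⟩
      · rintro (h | ⟨_, h2, h3⟩)
        · exact Or.inl (Or.inl h)
        · exact Or.inl (Or.inr ⟨h2, fun hax => h3 hax.symm⟩)
    · rw [if_neg hk]
      simp only [List.mem_cons]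
      constructor
      · rintro (h | ⟨h1, h2⟩)
        · exact Or.inl h
        · exact Or.inr ⟨Or.inr h1, h2⟩
      · rintro (h | ⟨h1 | h1, h2⟩)
        · exact Or.inl h
        · exact absurd h1 hk
        · exact Or.inr ⟨h1, h2⟩

theorem pv_nodup_AOuter (owners : List Int) (l : List Int) :
    ∀ d, (∀ j, ((d : PySem.Dict Int (PySem.Set Int)).getD j PySem.Set.empty).Nodup) →
    ∀ k, ((l.foldl (fun d a => pvAInner owners a d) d).getD k PySem.Set.empty).Nodup := by
  induction l with
  | nil => intro d hd k; exact hd k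
  | cons a t ih =>
    intro d hd k
    refine ih _ (fun j => ?_) k
    rw [pv_getD_AInner]
    split
    · exact PySem.Set.nodup_update _ _ (hd a)
    · exact hd j

-- == A's full loop: membership closed form ==
def pvACond (edge_map : List (Int × List Int)) (k x : Int) : Prop :=
  ∃ p ∈ edge_map, 2 ≤ p.2.length ∧ k ∈ p.2 ∧ x ∈ p.2 ∧ x ≠ k

theorem pv_mem_A (edge_map : List (Int × List Int)) :
    ∀ d k x, (x ∈ (edge_map.foldl pvAEdge d).getD k PySem.Set.empty) ↔
      (x ∈ d.getD k PySem.Set.empty ∨ pvACond edge_map k x) := by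
  induction edge_map with
  | nil => intro d k x; simp [pvACond]
  | cons p t ih =>
    intro d k x
    simp only [List.foldl_cons]
    rw [ih]
    have hstep : (x ∈ (pvAEdge d p).getD k PySem.Set.empty) ↔
        (x ∈ d.getD k PySem.Set.empty ∨ (2 ≤ p.2.length ∧ k ∈ p.2 ∧ x ∈ p.2 ∧ x ≠ k)) := by
      unfold pvAEdge
      split
      · rw [pv_mem_AOuter p.2 p.2 (fun a ha => ha)]
        constructor
        · rintro (h | ⟨h1, h2, h3⟩); · exact Or.inl h
          · exact Or.inr ⟨by assumption, h1, h2, h3⟩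
        · rintro (h | ⟨_, h1, h2, h3⟩); · exact Or.inl h
          · exact Or.inr ⟨h1, h2, h3⟩
      · constructor
        · exact Or.inl
        · rintro (h | ⟨h1, _⟩); · exact h
          · omega
    rw [hstep]
    unfold pvACond
    simp only [List.mem_cons]
    constructor
    · rintro ((h | h) | ⟨q, hq, hcond⟩)
      · exact Or.inl h
      · exact Or.inr ⟨p, Or.inl rfl, h⟩
      · exact Or.inr ⟨q, Or.inr hq, hcond⟩
    · rintro (h | ⟨q, hq | hq, hcond⟩)
      · exact Or.inl (Or.inl h)
      · exact Or.inl (Or.inr (hq ▸ hcond))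
      · exact Or.inr ⟨q, hq, hcond⟩

theorem pv_nodup_A (edge_map : List (Int × List Int)) :
    ∀ d, (∀ j, ((d : PySem.Dict Int (PySem.Set Int)).getD j PySem.Set.empty).Nodup) →
    ∀ k, ((edge_map.foldl pvAEdge d).getD k PySem.Set.empty).Nodup := by
  induction edge_map with
  | nil => intro d hd k; exact hd k
  | cons p t ih =>
    intro d hd k
    refine ih _ (fun j => ?_) k
    unfold pvAEdge
    split
    · exact pv_nodup_AOuter _ _ _ hd j
    · exact hd j

theorem pv_keys_A (leaves : List Int) (edge_map : List (Int × List Int))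
    (hpre : Pre_build_adjacency_from_edges leaves edge_map) :
    ∀ d : PySem.Dict Int (PySem.Set Int),
      (∀ j, j ∈ d.keys ↔ (0 ≤ j ∧ j < (leaves.length : Int))) →
      (edge_map.foldl pvAEdge d).keys = d.keys := by
  intro d hd
  refine pv_keys_foldl_stable d.keys edge_map pvAEdge ?_ d rfl
  intro d' p hp hk'
  unfold pvAEdge
  split
  · have hstep : (List.foldl (fun d a => pvAInner p.2 a d) d' p.2).keys = d'.keys := by
      refine pv_keys_foldl_stable d'.keys p.2 _ ?_ d' rfl
      intro d'' a ha hk''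
      rw [pv_keys_AInner p.2 a d'' ?_]
      · exact hk''
      · rintro ⟨b, hb, hba⟩
        rw [hk'', hk']
        exact (hd a).2 (hpre p hp a ha ⟨b, hb, hba⟩)
    rw [hstep, hk']
  · exact hk'

-- == B's index and union fold: membership and nodup ==
theorem pv_getD_idx_step (g : List Int) (l : List Int) (hl : l.Nodup) :
    ∀ (d : PySem.Dict Int (List (List Int))) k,
      (l.foldl (fun d a => d.modify a [] (fun t => t ++ [g])) d).getD k [] =
      if k ∈ l then d.getD k [] ++ [g] else d.getD k [] := by
  induction l with
  | nil => intro d k; simp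
  | cons a t ih =>
    intro d k
    rw [List.foldl_cons, ih (List.nodup_cons.1 hl).2]
    by_cases hk : k = a
    · subst hk
      rw [if_neg (List.nodup_cons.1 hl).1, if_pos List.mem_cons_self,
          PySem.Dict.getD_modify_self]
    · rw [PySem.Dict.getD_modify, if_neg hk]
      by_cases hkt : k ∈ t
      · rw [if_pos hkt, if_pos (List.mem_cons_of_mem _ hkt)]
      · rw [if_neg hkt, if_neg (by simp [hk, hkt])]

theorem pv_mem_idx (edge_map : List (Int × List Int)) :
    ∀ (d : PySem.Dict Int (List (List Int))) k g,
      (g ∈ (edge_map.foldl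
        (fun d p => if 2 ≤ p.2.length then
            (PySem.Set.ofList p.2).foldl (fun d a => d.modify a [] (fun t => t ++ [p.2])) d
          else d) d).getD k []) ↔
      (g ∈ d.getD k [] ∨ ∃ p ∈ edge_map, p.2 = g ∧ 2 ≤ p.2.length ∧ k ∈ p.2) := by
  induction edge_map with
  | nil => intro d k g; simp
  | cons p t ih =>
    intro d k g
    rw [List.foldl_cons, ih]
    have hstep : (g ∈ ((if 2 ≤ p.2.length then
        (PySem.Set.ofList p.2).foldl (fun d a => d.modify a [] (fun t => t ++ [p.2])) d
        else d)).getD k []) ↔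
        (g ∈ d.getD k [] ∨ (p.2 = g ∧ 2 ≤ p.2.length ∧ k ∈ p.2)) := by
      split
      · next h2 =>
        rw [pv_getD_idx_step p.2 _ (PySem.Set.nodup_ofList p.2)]
        by_cases hk : k ∈ PySem.Set.ofList p.2
        · rw [if_pos hk, List.mem_append, List.mem_singleton]
          have hk' : k ∈ p.2 := (PySem.Set.mem_ofList p.2 k).1 hk
          constructor
          · rintro (h | h)
            · exact Or.inl h
            · exact Or.inr ⟨h.symm, h2, hk'⟩
          · rintro (h | ⟨hg, _, _⟩)
            · exact Or.inl h
            · exact Or.inr hg.symm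
        · rw [if_neg hk]
          constructor
          · exact Or.inl
          · rintro (h | ⟨_, _, hkp⟩)
            · exact h
            · exact absurd ((PySem.Set.mem_ofList p.2 k).2 hkp) hk
      · next h2 =>
        constructor
        · exact Or.inl
        · rintro (h | ⟨_, h2', _⟩)
          · exact h
          · exact absurd h2' h2
    rw [hstep]
    simp only [List.mem_cons]
    constructor
    · rintro ((h | h) | ⟨q, hq, hcond⟩)
      · exact Or.inl h
      · exact Or.inr ⟨p, Or.inl rfl, h⟩
      · exact Or.inr ⟨q, Or.inr hq, hcond⟩
    · rintro (h | ⟨q, hq | hq, hcond⟩)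
      · exact Or.inl (Or.inl h)
      · exact Or.inl (Or.inr (hq ▸ hcond))
      · exact Or.inr ⟨q, hq, hcond⟩

theorem pv_mem_union (L : List (List Int)) :
    ∀ (s : PySem.Set Int) x,
      (x ∈ L.foldl (fun s owners => PySem.Set.update s owners) s) ↔
      (x ∈ s ∨ ∃ g ∈ L, x ∈ g) := by
  induction L with
  | nil => intro s x; simp
  | cons g t ih =>
    intro s x
    rw [List.foldl_cons, ih, PySem.Set.mem_update]
    simp only [List.mem_cons]
    constructor
    · rintro ((h | h) | ⟨q, hq, hx⟩)
      · exact Or.inl h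
      · exact Or.inr ⟨g, Or.inl rfl, h⟩
      · exact Or.inr ⟨q, Or.inr hq, hx⟩
    · rintro (h | ⟨q, hq | hq, hx⟩)
      · exact Or.inl (Or.inl h)
      · exact Or.inl (Or.inr (hq ▸ hx))
      · exact Or.inr ⟨q, hq, hx⟩

theorem pv_nodup_union (L : List (List Int)) :
    ∀ (s : PySem.Set Int), s.Nodup →
      (L.foldl (fun s owners => PySem.Set.update s owners) s).Nodup := by
  induction L with
  | nil => intro s hs; exact hs
  | cons g t ih =>
    intro s hs
    rw [List.foldl_cons]
    exact ih _ (PySem.Set.nodup_update _ _ hs)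

-- ===== VERDICT =====
theorem build_adjacency_from_edges_spec : Claim_equal_build_adjacency_from_edges := by
  intro leaves edge_map _hdom hpre
  unfold Spec_build_adjacency_from_edges
  unfold build_adjacency_from_edges build_adjacency_from_edges_alt
  simp only []
  have hkmem : ∀ j, j ∈ (pvInitAdj leaves).keys ↔ (0 ≤ j ∧ j < (leaves.length : Int)) := by
    intro j
    rw [pv_keys_init]
    exact PySem.List.mem_pyRange_one
  have hkA := pv_keys_A leaves edge_map hpre (pvInitAdj leaves) hkmem
  have hknd : (pvInitAdj leaves).keys.Nodup := by
    rw [pv_keys_init]; exact PySem.List.nodup_pyRange_one _ _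
  have hitemsA := PySem.Dict.items_eq_map_keys (edge_map.foldl pvAEdge (pvInitAdj leaves))
    (by rw [hkA]; exact hknd) PySem.Set.empty
  rw [hitemsA, hkA, pv_keys_init, List.map_map]
  refine List.map_congr_left ?_
  intro k hk
  simp only [Function.comp]
  congr 1
  unfold pvBNbrs
  simp only []
  rw [PySem.List.sorted_id_eq_sorted_id_iff_perm]
  have hndA := pv_nodup_A edge_map (pvInitAdj leaves)
    (fun j => by rw [pv_getD_init]; exact List.nodup_nil) k
  have hndB : (PySem.Set.discard
      (((pvBIndex edge_map).getD k []).foldl (fun s owners => PySem.Set.update s owners)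
        PySem.Set.empty) k).Nodup :=
    PySem.Set.nodup_discard _ _ (pv_nodup_union _ _ List.nodup_nil)
  rw [List.perm_ext_iff_of_nodup hndA hndB]
  intro x
  rw [PySem.Set.mem_discard, pv_mem_union, pv_mem_A, pv_getD_init]
  unfold pvACond
  constructor
  · intro hA
    rcases hA with h | ⟨p, hp, h2, hkp, hxp, hne⟩
    · exact absurd h (by simp [PySem.Set.empty])
    · refine ⟨Or.inr ⟨p.2, ?_, hxp⟩, hne⟩
      exact (pv_mem_idx edge_map PySem.Dict.empty k p.2).2 (Or.inr ⟨p, hp, rfl, h2, hkp⟩)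
  · intro hB
    rcases hB with ⟨hor, hne⟩
    rcases hor with h | ⟨g, hg, hxg⟩
    · exact absurd h (by simp [PySem.Set.empty])
    · rcases (pv_mem_idx edge_map PySem.Dict.empty k g).1 hg with h | ⟨p, hp, hpg, h2, hkp⟩
      · exact absurd h (by simp)
      · exact Or.inr ⟨p, hp, h2, hkp, hpg ▸ hxg, hne⟩
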